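-- pv_equiv track=rewrite | github.com/keghoang/Charon | prototypes/galt_clone/galt/processor.py | _filtered_widget_index
-- ===== SOURCE A (Python) =====
-- from typing import Any, Dict, List, Optional, Tuple
--
-- CONTROL_VALUE_TOKENS = {"fixed", "increment", "decrement", "randomize"}
--
-- def _filtered_widget_index(widget_values: Any, original_index: int) -> Optional[int]:
--     """
--     Replicate the converter's filtering to map original widget indices to the
--     filtered order used when assigning API inputs.
--     """
--     if not isinstance(widget_values, list):
--         return None
--     filtered_index = 0
--     for idx, value in enumerate(widget_values):
--         if value in CONTROL_VALUE_TOKENS: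
--             continue
--         if idx == original_index:
--             return filtered_index
--         filtered_index += 1
--     return None
-- ===== SOURCE B (Python) =====
-- CONTROL_VALUE_TOKENS = {"fixed", "increment", "decrement", "randomize"}
--
-- def _filtered_widget_index(widget_values, original_index):
--     if not isinstance(widget_values, list):
--         return None
--     kept = [i for i, v in enumerate(widget_values) if v not in CONTROL_VALUE_TOKENS]
--     try:
--         return kept.index(original_index)
--     except ValueError:
--         return None
-- ===== Notes on version B (the rewrite author's own statement) =====
-- stated objective: alternative
-- what changed: Instead of A's single scan carrying a running counter with an early return, B materializes the list of surviving original indices and answers with list.index, i.e. a staged build-then-search decomposition.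
import Mathlib
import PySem

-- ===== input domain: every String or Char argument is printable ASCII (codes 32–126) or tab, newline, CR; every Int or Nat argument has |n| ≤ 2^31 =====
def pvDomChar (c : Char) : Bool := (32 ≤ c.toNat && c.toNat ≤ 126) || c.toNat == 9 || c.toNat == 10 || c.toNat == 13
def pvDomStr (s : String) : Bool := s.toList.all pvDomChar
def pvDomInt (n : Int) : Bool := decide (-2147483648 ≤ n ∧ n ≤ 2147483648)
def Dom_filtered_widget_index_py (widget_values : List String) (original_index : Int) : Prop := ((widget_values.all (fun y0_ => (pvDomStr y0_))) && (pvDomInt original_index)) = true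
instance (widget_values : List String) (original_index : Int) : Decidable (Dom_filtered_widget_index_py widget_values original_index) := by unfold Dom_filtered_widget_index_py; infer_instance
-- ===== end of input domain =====

-- B replaces A's single scan with a running counter and early return by a staged
-- build-then-search: materialize the surviving original indices, then list.index
-- (objective: alternative decomposition, same cost).

-- CONTROL_VALUE_TOKENS = {"fixed", "increment", "decrement", "randomize"}
def controlValueTokens : PySem.Set String :=
  PySem.Set.ofList ["fixed", "increment", "decrement", "randomize"]

-- ===== PORT A =====
-- the for-loop over enumerate(widget_values) with the running filtered_index counter
def fwiLoopA : List String → Int → Int → Int → Option Int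
  | [], _, _, _ => none
  | v :: rest, idx, orig, fi =>
    if controlValueTokens.contains v then
      fwiLoopA rest (idx + 1) orig fi
    else if idx = orig then
      some fi
    else
      fwiLoopA rest (idx + 1) orig (fi + 1)

def filtered_widget_index_py (widget_values : List String) (original_index : Int) : Option Int :=
  fwiLoopA widget_values 0 original_index 0

-- ===== PORT B =====
-- kept = [i for i, v in enumerate(widget_values) if v not in CONTROL_VALUE_TOKENS]
-- then kept.index(original_index), ValueError -> None
def filtered_widget_index_py_alt (widget_values : List String) (original_index : Int) : Option Int :=
  let kept := ((PySem.List.enumerate widget_values 0).filter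
      (fun p => !(controlValueTokens.contains p.2))).map (fun p => p.1)
  (PySem.List.index? kept original_index).map (fun n => (n : Int))

-- ===== PRECONDITION & SPEC =====
def Spec_filtered_widget_index_py (widget_values : List String) (original_index : Int) (out : Option Int) : Prop := out = filtered_widget_index_py_alt widget_values original_index
instance (widget_values : List String) (original_index : Int) (out : Option Int) : Decidable (Spec_filtered_widget_index_py widget_values original_index out) := by unfold Spec_filtered_widget_index_py; infer_instance

-- ===== CLAIM (what is proved, stated in full; the proofs are below) =====
def Claim_equal_filtered_widget_index_py : Prop := ∀ (widget_values : List String) (original_index : Int), Dom_filtered_widget_index_py widget_values original_index → Spec_filtered_widget_index_py widget_values original_index (filtered_widget_index_py widget_values original_index)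

-- ===== LEMMAS AND PROOFS =====

-- the surviving-index list B builds, parameterised by the enumeration start
def keptFrom (l : List String) (s : Int) : List Int :=
  ((PySem.List.enumerate l s).filter (fun p => !(controlValueTokens.contains p.2))).map
    (fun p => p.1)

theorem fwiLoopA_eq_index (l : List String) : ∀ (s orig fi : Int),
    fwiLoopA l s orig fi
      = (PySem.List.index? (keptFrom l s) orig).map (fun n => fi + (n : Int)) := by
  induction l with
  | nil => intro s orig fi; simp [fwiLoopA, keptFrom, PySem.List.enumerate_nil]
  | cons v rest ih =>
    intro s orig fi
    simp only [fwiLoopA, keptFrom, PySem.List.enumerate_cons, List.filter_cons]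
    by_cases hc : controlValueTokens.contains v = true
    · simp only [hc, Bool.not_true, if_true, Bool.false_eq_true, if_false]
      exact ih (s + 1) orig fi
    · simp only [Bool.not_eq_true] at hc
      simp only [hc, Bool.not_false, if_true, Bool.false_eq_true, if_false, List.map_cons]
      by_cases he : s = orig
      · subst he
        rw [PySem.List.index?_cons_self]
        simp
      · rw [if_neg he, PySem.List.index?_cons_of_ne _ he, ih (s + 1) orig (fi + 1),
          show List.map (fun p => p.1) (List.filter (fun p => !controlValueTokens.contains p.2)
            (PySem.List.enumerate rest (s + 1))) = keptFrom rest (s + 1) from rfl]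
        rcases PySem.List.index? (keptFrom rest (s + 1)) orig with _ | n
        · rfl
        · simp only [Option.map_some, Option.bind_some, Option.bind_eq_bind,
            Option.pure_def, Option.some.injEq]
          push_cast
          ring

-- ===== VERDICT (by name: the statement is the Claim_ definition above) =====
theorem filtered_widget_index_py_spec : Claim_equal_filtered_widget_index_py := by
  intro widget_values original_index _
  show filtered_widget_index_py widget_values original_index = _
  rw [filtered_widget_index_py, fwiLoopA_eq_index]
  simp [filtered_widget_index_py_alt, keptFrom]
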